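-- pv_equiv track=rewrite | github.com/ericrihm/yt-whisper | yt_whisper/diarizer.py | rename_speaker_labels
-- ===== SOURCE A (Python) =====
-- def rename_speaker_labels(segments):
--     """Rename SPEAKER_XX -> 'Speaker N' in order of first appearance.
--
--     SPEAKER_UNKNOWN is preserved as-is. Mutates and returns segments.
--     """
--     mapping = {}
--     next_idx = 1
--     for seg in segments:
--         sp = seg.get("speaker")
--         if not sp or sp == "SPEAKER_UNKNOWN":
--             continue
--         if sp not in mapping:
--             mapping[sp] = f"Speaker {next_idx}"
--             next_idx += 1
--     for seg in segments:
--         sp = seg.get("speaker")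
--         if sp in mapping:
--             seg["speaker"] = mapping[sp]
--     return segments
-- ===== SOURCE B (Python) =====
-- def rename_speaker_labels(segments):
--     """Rename SPEAKER_XX -> 'Speaker N' in order of first appearance.
--
--     Single pass: the mapping is built and applied in the same loop (a
--     speaker's label is fixed at its first appearance, so the final mapping
--     is never needed ahead of time). Mutates and returns segments.
--     """
--     mapping = {}
--     next_idx = 1
--     for seg in segments:
--         sp = seg.get("speaker")
--         if not sp or sp == "SPEAKER_UNKNOWN":
--             continue
--         label = mapping.get(sp)
--         if label is None:
--             label = f"Speaker {next_idx}"
--             mapping[sp] = label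
--             next_idx += 1
--         seg["speaker"] = label
--     return segments
-- ===== Notes on version B (the rewrite author's own statement) =====
-- stated objective: simpler
-- what changed: B fuses A's two scans (build the speaker mapping, then rewrite all segments) into a single pass that assigns each speaker's label at first appearance and applies it immediately, carrying (mapping, next_idx) through one loop.
import Mathlib
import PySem

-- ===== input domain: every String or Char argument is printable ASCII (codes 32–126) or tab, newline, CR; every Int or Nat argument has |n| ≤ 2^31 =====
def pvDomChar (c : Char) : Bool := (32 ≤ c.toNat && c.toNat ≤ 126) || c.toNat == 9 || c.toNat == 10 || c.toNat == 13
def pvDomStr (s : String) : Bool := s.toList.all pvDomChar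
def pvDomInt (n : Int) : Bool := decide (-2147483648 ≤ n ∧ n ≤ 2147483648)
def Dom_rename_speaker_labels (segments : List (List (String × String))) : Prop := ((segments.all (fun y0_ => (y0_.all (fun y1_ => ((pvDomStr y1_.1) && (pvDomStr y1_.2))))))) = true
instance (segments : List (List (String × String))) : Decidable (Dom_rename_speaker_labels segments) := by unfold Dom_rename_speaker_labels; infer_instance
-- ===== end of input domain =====

-- B fuses A's two passes into one loop: each speaker's label is final at first
-- appearance, so the mapping can be built and applied in the same pass
-- (objective: simpler; return-value equivalence — A and B both mutate the
-- segment dicts in place in Python, identically).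


-- ===== PORT A =====
-- first loop: build mapping (dict) and next_idx
def pass1step (st : PySem.Dict String String × Int) (seg : List (String × String)) :
    PySem.Dict String String × Int :=
  match (PySem.Dict.ofList seg).get? "speaker" with
  | none => st
  | some sp =>
    if sp = "" ∨ sp = "SPEAKER_UNKNOWN" then st
    else if (st.1.get? sp).isSome then st
    else (st.1.insert sp ("Speaker " ++ PySem.Int.toStr st.2), st.2 + 1)

-- second loop: seg["speaker"] = mapping[sp] if sp in mapping
def applySeg (m : PySem.Dict String String) (seg : List (String × String)) :
    List (String × String) :=
  match (PySem.Dict.ofList seg).get? "speaker" with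
  | none => (PySem.Dict.ofList seg).items
  | some sp =>
    match m.get? sp with
    | some v => ((PySem.Dict.ofList seg).insert "speaker" v).items
    | none => (PySem.Dict.ofList seg).items

def rename_speaker_labels (segments : List (List (String × String))) :
    List (List (String × String)) :=
  let st := segments.foldl pass1step (PySem.Dict.empty, 1)
  segments.map (applySeg st.1)

-- ===== PORT B =====
-- single pass carrying (mapping, next_idx); label assigned and applied together
def bloop (d : PySem.Dict String String) (n : Int) :
    List (List (String × String)) → List (List (String × String))
  | [] => []
  | seg :: rest =>
    match (PySem.Dict.ofList seg).get? "speaker" with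
    | none => (PySem.Dict.ofList seg).items :: bloop d n rest
    | some sp =>
      if sp = "" ∨ sp = "SPEAKER_UNKNOWN" then (PySem.Dict.ofList seg).items :: bloop d n rest
      else
        match d.get? sp with
        | some label => ((PySem.Dict.ofList seg).insert "speaker" label).items :: bloop d n rest
        | none =>
          ((PySem.Dict.ofList seg).insert "speaker" ("Speaker " ++ PySem.Int.toStr n)).items
            :: bloop (d.insert sp ("Speaker " ++ PySem.Int.toStr n)) (n + 1) rest

def rename_speaker_labels_alt (segments : List (List (String × String))) :
    List (List (String × String)) :=
  bloop PySem.Dict.empty 1 segments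

-- ===== PRECONDITION & SPEC =====
def Spec_rename_speaker_labels (segments : List (List (String × String))) (out : List (List (String × String))) : Prop := out = rename_speaker_labels_alt segments
instance (segments : List (List (String × String))) (out : List (List (String × String))) : Decidable (Spec_rename_speaker_labels segments out) := by unfold Spec_rename_speaker_labels; infer_instance

-- ===== CLAIM (what is proved, stated in full; the proofs are below) =====
def Claim_equal_rename_speaker_labels : Prop := ∀ (segments : List (List (String × String))), Dom_rename_speaker_labels segments → Spec_rename_speaker_labels segments (rename_speaker_labels segments)

-- ===== LEMMAS AND PROOFS =====

-- one step of pass 1 only ever inserts a key that was absent, so existing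
-- entries are preserved
theorem step_mono (st : PySem.Dict String String × Int) (seg : List (String × String))
    (k : String) (v : String) (h : st.1.get? k = some v) :
    (pass1step st seg).1.get? k = some v := by
  unfold pass1step
  cases hg : (PySem.Dict.ofList seg).get? "speaker" with
  | none => exact h
  | some sp =>
    simp only
    split_ifs with h1 h2
    · exact h
    · exact h
    · by_cases hk : k = sp
      · subst hk; rw [h] at h2; simp at h2
      · simpa [PySem.Dict.get?_insert_of_ne _ _ hk] using h

theorem foldl_pass1_mono (segs : List (List (String × String)))
    (st : PySem.Dict String String × Int) (k v : String) (h : st.1.get? k = some v) :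
    (segs.foldl pass1step st).1.get? k = some v := by
  induction segs generalizing st with
  | nil => exact h
  | cons seg rest ih => exact ih _ (step_mono st seg k v h)

-- pass 1 never inserts "" or "SPEAKER_UNKNOWN" as a key
theorem step_bad (st : PySem.Dict String String × Int) (seg : List (String × String))
    (x : String) (hx : x = "" ∨ x = "SPEAKER_UNKNOWN") :
    (pass1step st seg).1.get? x = st.1.get? x := by
  unfold pass1step
  cases hg : (PySem.Dict.ofList seg).get? "speaker" with
  | none => rfl
  | some sp =>
    simp only
    split_ifs with h1 h2
    · rfl
    · rfl
    · have hne : x ≠ sp := by intro hc; subst hc; exact h1 hx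
      exact PySem.Dict.get?_insert_of_ne _ _ hne

theorem foldl_pass1_bad (segs : List (List (String × String)))
    (st : PySem.Dict String String × Int) (x : String) (hx : x = "" ∨ x = "SPEAKER_UNKNOWN") :
    (segs.foldl pass1step st).1.get? x = st.1.get? x := by
  induction segs generalizing st with
  | nil => rfl
  | cons seg rest ih => rw [List.foldl_cons, ih _, step_bad st seg x hx]

-- applying a mapping m to one segment, given what m returns on its speaker
theorem applySeg_of_none (m : PySem.Dict String String) (seg : List (String × String))
    (hg : (PySem.Dict.ofList seg).get? "speaker" = none) :
    applySeg m seg = (PySem.Dict.ofList seg).items := by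
  unfold applySeg; rw [hg]

theorem applySeg_of_miss (m : PySem.Dict String String) (seg : List (String × String))
    (sp : String) (hg : (PySem.Dict.ofList seg).get? "speaker" = some sp)
    (hm : m.get? sp = none) :
    applySeg m seg = (PySem.Dict.ofList seg).items := by
  unfold applySeg; rw [hg]; simp only [hm]

theorem applySeg_of_hit (m : PySem.Dict String String) (seg : List (String × String))
    (sp v : String) (hg : (PySem.Dict.ofList seg).get? "speaker" = some sp)
    (hm : m.get? sp = some v) :
    applySeg m seg = ((PySem.Dict.ofList seg).insert "speaker" v).items := by
  unfold applySeg; rw [hg]; simp only [hm]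

-- main invariant: applying the final mapping (continued from state (d, n))
-- over segs equals B's fused loop started at (d, n)
theorem main_inv (segs : List (List (String × String))) (d : PySem.Dict String String)
    (n : Int) (h1 : d.get? "" = none) (h2 : d.get? "SPEAKER_UNKNOWN" = none) :
    segs.map (applySeg (segs.foldl pass1step (d, n)).1) = bloop d n segs := by
  induction segs generalizing d n with
  | nil => rfl
  | cons seg rest ih =>
    rw [List.foldl_cons, List.map_cons]
    cases hg : (PySem.Dict.ofList seg).get? "speaker" with
    | none =>
      have hstep : pass1step (d, n) seg = (d, n) := by unfold pass1step; rw [hg]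
      have hb : bloop d n (seg :: rest)
          = (PySem.Dict.ofList seg).items :: bloop d n rest := by
        simp only [bloop, hg]
      rw [hstep, applySeg_of_none _ _ hg, ih d n h1 h2, hb]
    | some sp =>
      by_cases hbad : sp = "" ∨ sp = "SPEAKER_UNKNOWN"
      · have hstep : pass1step (d, n) seg = (d, n) := by
          unfold pass1step; rw [hg]; simp only [if_pos hbad]
        have hnone : (rest.foldl pass1step (d, n)).1.get? sp = none := by
          rw [foldl_pass1_bad rest (d, n) sp hbad]
          rcases hbad with h | h <;> subst h <;> assumption
        have hb : bloop d n (seg :: rest)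
            = (PySem.Dict.ofList seg).items :: bloop d n rest := by
          simp only [bloop, hg, if_pos hbad]
        rw [hstep, applySeg_of_miss _ _ sp hg hnone, ih d n h1 h2, hb]
      · cases hd : d.get? sp with
        | some v =>
          have hstep : pass1step (d, n) seg = (d, n) := by
            unfold pass1step; rw [hg]; simp [hbad, hd]
          have hhit := foldl_pass1_mono rest (d, n) sp v hd
          have hb : bloop d n (seg :: rest)
              = ((PySem.Dict.ofList seg).insert "speaker" v).items :: bloop d n rest := by
            simp only [bloop, hg, if_neg hbad, hd]
          rw [hstep, applySeg_of_hit _ _ sp v hg hhit, ih d n h1 h2, hb]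
        | none =>
          have hne1 : sp ≠ "" := fun hc => hbad (Or.inl hc)
          have hne2 : sp ≠ "SPEAKER_UNKNOWN" := fun hc => hbad (Or.inr hc)
          have hstep : pass1step (d, n) seg
              = (d.insert sp ("Speaker " ++ PySem.Int.toStr n), n + 1) := by
            unfold pass1step; rw [hg]; simp [hbad, hd]
          have hhit : (rest.foldl pass1step
              (d.insert sp ("Speaker " ++ PySem.Int.toStr n), n + 1)).1.get? sp
              = some ("Speaker " ++ PySem.Int.toStr n) :=
            foldl_pass1_mono _ _ _ _ (PySem.Dict.get?_insert_self _ _ _)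
          have hb : bloop d n (seg :: rest)
              = ((PySem.Dict.ofList seg).insert "speaker" ("Speaker " ++ PySem.Int.toStr n)).items
                :: bloop (d.insert sp ("Speaker " ++ PySem.Int.toStr n)) (n + 1) rest := by
            simp only [bloop, hg, if_neg hbad, hd]
          rw [hstep, applySeg_of_hit _ _ sp _ hg hhit, hb]
          rw [ih (d.insert sp ("Speaker " ++ PySem.Int.toStr n)) (n + 1)
              (by rw [PySem.Dict.get?_insert_of_ne _ _ (fun h => hne1 h.symm)]; exact h1)
              (by rw [PySem.Dict.get?_insert_of_ne _ _ (fun h => hne2 h.symm)]; exact h2)]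

-- ===== VERDICT (by name: the statement is the Claim_ definition above) =====
theorem rename_speaker_labels_spec : Claim_equal_rename_speaker_labels := by
  intro segments _
  unfold Spec_rename_speaker_labels rename_speaker_labels rename_speaker_labels_alt
  exact main_inv segments PySem.Dict.empty 1 rfl rfl
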